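-- pv_equiv track=rewrite | github.com/odylith/odylith | src/odylith/cli.py | _forwarded_has_flag
-- ===== SOURCE A (Python) =====
-- from typing import Sequence
--
-- def _forwarded_has_flag(forwarded: Sequence[str], flag: str) -> bool:
--     needle = str(flag or "").strip()
--     if not needle:
--         return False
--     for token in (str(token).strip() for token in forwarded):
--         if token == "--":
--             break
--         if token == needle:
--             return True
--     return False
-- ===== SOURCE B (Python) =====
-- from typing import Sequence
--
-- def _forwarded_has_flag(forwarded: Sequence[str], flag: str) -> bool:
--     needle = str(flag or "").strip()
--     if not needle:
--         return False
--     tokens = [str(t).strip() for t in forwarded]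
--     cut = tokens.index("--") if "--" in tokens else len(tokens)
--     return needle in tokens[:cut]
-- ===== Notes on version B (the rewrite author's own statement) =====
-- stated objective: simpler
-- what changed: Replaces the fused early-break scan with a two-phase formulation: build the full stripped token list, locate the '--' sentinel cutoff, then test membership in the prefix.
import Mathlib
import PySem

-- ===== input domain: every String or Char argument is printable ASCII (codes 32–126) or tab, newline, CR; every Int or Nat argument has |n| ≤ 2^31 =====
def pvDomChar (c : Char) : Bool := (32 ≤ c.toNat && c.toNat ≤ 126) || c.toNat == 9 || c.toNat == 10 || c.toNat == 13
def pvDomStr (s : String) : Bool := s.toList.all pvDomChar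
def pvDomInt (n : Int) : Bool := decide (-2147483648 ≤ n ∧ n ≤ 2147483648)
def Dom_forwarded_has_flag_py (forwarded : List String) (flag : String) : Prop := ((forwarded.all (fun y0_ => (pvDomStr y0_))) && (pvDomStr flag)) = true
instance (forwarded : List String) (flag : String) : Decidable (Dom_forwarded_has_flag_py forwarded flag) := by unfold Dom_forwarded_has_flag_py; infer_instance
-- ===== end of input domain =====

-- B builds the stripped token list first, locates the '--' cutoff, then tests membership in the prefix (objective: simpler two-phase decomposition; same O(n) cost).
-- ===== PORT A =====
-- the for-loop over the stripping generator, with break/return, as structural recursion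
def fwdLoopA (needle : String) : List String → Bool
  | [] => false
  | t :: rest =>
    let token := PySem.Str.strip t
    if token == "--" then false
    else if token == needle then true
    else fwdLoopA needle rest

def forwarded_has_flag_py (forwarded : List String) (flag : String) : Bool :=
  let needle := PySem.Str.strip flag   -- str(flag or "").strip()
  if needle == "" then false
  else fwdLoopA needle forwarded

-- ===== PORT B =====
def forwarded_has_flag_py_alt (forwarded : List String) (flag : String) : Bool :=
  let needle := PySem.Str.strip flag
  if needle == "" then false
  else
    let tokens := forwarded.map PySem.Str.strip
    let cut : Nat := if tokens.contains "--" then (PySem.List.index? tokens "--").getD tokens.length else tokens.length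
    (PySem.List.slice tokens none (some (cut : Int))).contains needle

-- ===== PRECONDITION & SPEC =====
def Spec_forwarded_has_flag_py (forwarded : List String) (flag : String) (out : Bool) : Prop := out = forwarded_has_flag_py_alt forwarded flag
instance (forwarded : List String) (flag : String) (out : Bool) : Decidable (Spec_forwarded_has_flag_py forwarded flag out) := by unfold Spec_forwarded_has_flag_py; infer_instance

-- ===== CLAIM (what is proved, stated in full; the proofs are below) =====
def Claim_equal_forwarded_has_flag_py : Prop := ∀ (forwarded : List String) (flag : String), Dom_forwarded_has_flag_py forwarded flag → Spec_forwarded_has_flag_py forwarded flag (forwarded_has_flag_py forwarded flag)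

-- ===== LEMMAS AND PROOFS =====

-- ===== VERDICT (by name: the statement is the Claim_ definition above) =====
-- B's locate-then-slice prefix is exactly the tokens before the first "--"
lemma take_cut_eq_takeWhile (ts : List String) :
    ts.take (if ts.contains "--" then (PySem.List.index? ts "--").getD ts.length else ts.length)
      = ts.takeWhile (fun t => t != "--") := by
  induction ts with
  | nil => simp
  | cons t ts ih =>
    by_cases h : t = "--"
    · subst h
      have h0 := PySem.List.index?_cons_self "--" ts
      rw [PySem.List.index?_eq_idxOf?] at h0
      simp [h0]
    · rw [PySem.List.index?_cons_of_ne ts h]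
      by_cases hc : "--" ∈ ts
      · obtain ⟨k, hk⟩ := Option.isSome_iff_exists.mp
          ((PySem.List.index?_isSome_iff ts "--").mpr hc)
        have hcts : (ts.contains "--") = true := by simpa using hc
        simp only [hcts, if_pos] at ih
        simp only [hk] at ih
        simp [hc, h, Ne.symm h]
        rw [PySem.List.index?_eq_idxOf?] at hk
        simpa [hk] using ih
      · have hcts : (ts.contains "--") = false := by simpa using hc
        simp only [hcts, Bool.false_eq_true, if_neg, not_false_iff] at ih
        simp [hc, h, Ne.symm h, ih]

-- A's fused loop computes membership of the needle in that same prefix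
lemma loopA_eq (needle : String) (fwd : List String) :
    fwdLoopA needle fwd
      = ((fwd.map PySem.Str.strip).takeWhile (fun t => t != "--")).contains needle := by
  induction fwd with
  | nil => simp [fwdLoopA]
  | cons t rest ih =>
    by_cases h : PySem.Str.strip t = "--"
    · simp [fwdLoopA, h]
    · by_cases he : PySem.Str.strip t = needle
      · simp [fwdLoopA, he, List.takeWhile_cons]
      · simp [fwdLoopA, h, he, ih]
        exact fun heq => absurd heq.symm he

theorem forwarded_has_flag_py_spec : Claim_equal_forwarded_has_flag_py := by
  intro forwarded flag _
  unfold Spec_forwarded_has_flag_py forwarded_has_flag_py forwarded_has_flag_py_alt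
  by_cases h : PySem.Str.strip flag = ""
  · simp [h]
  · simp only [h, beq_iff_eq]
    rw [PySem.List.slice_to_natCast, take_cut_eq_takeWhile, loopA_eq]
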